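-- pv_equiv track=rewrite | github.com/Afoninje/Sudoku_Solver | Functions.py | findDistinct
-- ===== SOURCE A (Python) =====
-- def findDistinct(Str):
--
--     n = len(Str)
--     unique = ""
--     count = [0 for i in range(256)]
--     index = [n for i in range(256)]
--
--     for i in range(n):
--
--         x = ord(Str[i])
--         count[x] += 1
--
--         if (count[x] == 1 and x !=' '):
--             index[x] = i
--
--         if (count[x] == 2):
--             index[x] = n
--
--     index=sorted(index)
--
--     for i in range(256):
--         if index[i] == n:
--             break
--         unique = unique + Str[index[i]]
--
--     return unique
-- ===== SOURCE B (Python) =====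
-- def findDistinct(Str):
--     count = [0] * 256
--     for c in Str:
--         count[ord(c)] += 1
--     return ''.join(c for c in Str if count[ord(c)] == 1)
-- ===== Notes on version B (the rewrite author's own statement) =====
-- stated objective: simpler
-- what changed: B drops A's 256-entry first-occurrence index array and the sort of it entirely: it counts occurrences into a 256-slot array in one pass and then rescans the string, keeping exactly the characters whose count is 1 (a unique character's only occurrence IS its first occurrence, so the rescan yields them in the same order A's sort-of-indices does).
import Mathlib
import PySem

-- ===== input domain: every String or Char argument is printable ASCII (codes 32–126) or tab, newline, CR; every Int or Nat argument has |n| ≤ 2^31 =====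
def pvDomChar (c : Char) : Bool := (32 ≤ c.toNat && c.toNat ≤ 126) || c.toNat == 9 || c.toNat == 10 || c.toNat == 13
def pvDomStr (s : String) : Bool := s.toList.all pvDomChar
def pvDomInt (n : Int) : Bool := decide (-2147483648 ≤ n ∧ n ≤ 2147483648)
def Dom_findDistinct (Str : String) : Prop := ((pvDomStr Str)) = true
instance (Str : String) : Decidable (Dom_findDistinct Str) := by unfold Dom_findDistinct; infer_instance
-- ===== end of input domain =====

-- B replaces A's first-occurrence index array + sort with a count pass and a direct rescan of the string (simpler, same result).


-- ===== PORT A =====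
-- first loop of A: for i in range(n): update count[x] and index[x]
-- (Python's `x != ' '` compares an int with a string and is always True, so only `count[x] == 1` decides the branch)
def findDistinctLoop1 (n : Int) : List Char → Nat → List Int → List Int → List Int × List Int
  | [], _, cnt, idx => (cnt, idx)
  | c :: rest, i, cnt, idx =>
    let x := c.toNat
    let cnt' := cnt.set x (cnt.getD x 0 + 1)
    let idx' := if cnt'.getD x 0 = 1 then idx.set x (i : Int) else idx
    let idx'' := if cnt'.getD x 0 = 2 then idx'.set x n else idx'
    findDistinctLoop1 n rest (i + 1) cnt' idx''

-- second loop of A: for i in range(256): break at n, else append Str[index[i]]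
-- (pyGet? is exact here: whenever the else branch runs, 0 ≤ j < n, so the .getD default is never used)
def findDistinctLoop2 (l : List Char) (n : Int) : List Int → List Char → List Char
  | [], acc => acc
  | j :: rest, acc =>
    if j = n then acc
    else findDistinctLoop2 l n rest (acc ++ [(PySem.List.pyGet? l j).getD ' '])

def findDistinct (Str : String) : String :=
  String.ofList (findDistinctLoop2 Str.toList (Str.toList.length : Int)
    (PySem.List.sorted
      (findDistinctLoop1 (Str.toList.length : Int) Str.toList 0
        (List.replicate 256 0) (List.replicate 256 (Str.toList.length : Int))).2
      (fun x => x))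
    [])

-- ===== PORT B =====
def findDistinct_alt (Str : String) : String :=
  String.ofList (Str.toList.filter (fun c =>
    (Str.toList.foldl (fun cnt c => cnt.set c.toNat (cnt.getD c.toNat 0 + 1))
      (List.replicate 256 (0 : Int))).getD c.toNat 0 == 1))

-- ===== PRECONDITION & SPEC =====
def Spec_findDistinct (Str : String) (out : String) : Prop := out = findDistinct_alt Str
instance (Str : String) (out : String) : Decidable (Spec_findDistinct Str out) := by unfold Spec_findDistinct; infer_instance

-- ===== CLAIM (what is proved, stated in full; the proofs are below) =====
def Claim_equal_findDistinct : Prop := ∀ (Str : String), Dom_findDistinct Str → Spec_findDistinct Str (findDistinct Str)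

-- ===== LEMMAS AND PROOFS =====

-- number of occurrences of code x in l, as an Int (the value A's and B's count arrays hold)
def codeCnt (l : List Char) (x : Nat) : Int := (l.countP (fun c => c.toNat == x) : Int)

-- the value A's index array holds for code x after the first loop
def idxF (n : Int) (l : List Char) (x : Nat) : Int :=
  if codeCnt l x = 1 then (l.findIdx (fun c => c.toNat == x) : Int) else n

-- the (position, char) pairs B keeps, in string order
def qual (l : List Char) : List (Char × Nat) :=
  l.zipIdx.filter (fun ci => codeCnt l ci.1.toNat == 1)

lemma set_map_range (f : Nat → Int) (m x : Nat) (v : Int) :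
    ((List.range m).map f).set x v = (List.range m).map (Function.update f x v) := by
  apply List.ext_getElem
  · simp
  · intro i h1 h2
    simp only [List.getElem_set, List.getElem_map, List.getElem_range]
    simp only [List.length_set, List.length_map, List.length_range] at h1
    rcases eq_or_ne x i with rfl | hne
    · simp [Function.update_apply]
    · simp [hne, Ne.symm hne]

lemma codeCnt_append_single (p : List Char) (c : Char) (y : Nat) :
    codeCnt (p ++ [c]) y = codeCnt p y + (if c.toNat == y then 1 else 0) := by
  simp only [codeCnt, List.countP_append, List.countP_cons, List.countP_nil]
  split <;> simp

lemma countFold (l : List Char) (hs : ∀ c ∈ l, c.toNat < 256) (g : Nat → Int) :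
    l.foldl (fun cnt c => cnt.set c.toNat (cnt.getD c.toNat 0 + 1)) ((List.range 256).map g)
      = (List.range 256).map (fun x => g x + codeCnt l x) := by
  induction l generalizing g with
  | nil => simp [codeCnt]
  | cons c rest ih =>
    have hx : c.toNat < 256 := hs c (by simp)
    have hrest : ∀ c ∈ rest, c.toNat < 256 := fun c hc => hs c (by simp [hc])
    · simp only [List.foldl_cons]
      rw [PySem.List.getD_map_range _ _ _ _ hx, set_map_range, ih hrest]
      apply congrArg (fun f => List.map f (List.range 256))
      funext y
      simp only [Function.update_apply, codeCnt, List.countP_cons]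
      rcases eq_or_ne y c.toNat with rfl | hne
      · simp
        ring
      · simp [Ne.symm hne]
        intro h; exact (hne h).elim

lemma idxF_append_single (p : List Char) (c : Char) (n : Int) :
    idxF n (p ++ [c]) = fun y =>
      if y = c.toNat then
        (if codeCnt p y = 0 then (p.length : Int)
         else if codeCnt p y = 1 then n else idxF n p y)
      else idxF n p y := by
  funext y
  rcases eq_or_ne y c.toNat with rfl | hne
  · rw [if_pos rfl]
    have hcy : codeCnt (p ++ [c]) c.toNat = codeCnt p c.toNat + 1 := by
      rw [codeCnt_append_single]; simp
    rcases eq_or_ne (codeCnt p c.toNat) 0 with h0 | h0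
    · -- not in p: new count 1, findIdx lands on c at position p.length
      have hnone : ∀ a ∈ p, ¬((fun d => d.toNat == c.toNat) a = true) := by
        have := List.countP_eq_zero.mp (by
          have : (p.countP (fun d => d.toNat == c.toNat) : Int) = 0 := h0
          exact_mod_cast this)
        exact this
      have hfa : p.findIdx (fun d => d.toNat == c.toNat) = p.length := by
        rw [List.findIdx_eq_length]
        intro a ha; simpa using hnone a ha
      simp only [idxF, hcy, h0]
      norm_num [List.findIdx_append, hfa, List.findIdx_cons]
    · rcases eq_or_ne (codeCnt p c.toNat) 1 with h1 | h1
      · simp only [idxF, hcy, h1]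
        norm_num [h0]
      · have hge : (0:Int) ≤ codeCnt p c.toNat := by simp only [codeCnt]; positivity
        simp only [idxF, hcy]
        rw [if_neg (by omega)]
        norm_num [h0, h1]
  · simp only [if_neg hne]
    have hcy : codeCnt (p ++ [c]) y = codeCnt p y := by
      rw [codeCnt_append_single, if_neg (by simp only [beq_iff_eq]; exact fun h => (hne h.symm).elim), add_zero]
    simp only [idxF, hcy]
    rcases eq_or_ne (codeCnt p y) 1 with h1 | h1
    · -- y occurs in p, so findIdx over p ++ [c] stops inside p
      have hin : p.findIdx (fun d => d.toNat == y) < p.length := by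
        rw [List.findIdx_lt_length]
        have h1' : p.countP (fun d => d.toNat == y) = 1 := by
          have : (p.countP (fun d => d.toNat == y) : Int) = 1 := h1
          exact_mod_cast this
        rcases List.countP_pos_iff.mp (by rw [h1']; exact Nat.one_pos) with ⟨a, ha, hpa⟩
        exact ⟨a, ha, hpa⟩
      rw [if_pos h1, if_pos h1, List.findIdx_append, if_pos hin]
    · rw [if_neg h1, if_neg h1]

lemma loop1Inv (n : Int) (l p : List Char) (hs : ∀ c ∈ l, c.toNat < 256) :
    findDistinctLoop1 n l p.length ((List.range 256).map (codeCnt p)) ((List.range 256).map (idxF n p))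
      = ((List.range 256).map (codeCnt (p ++ l)), (List.range 256).map (idxF n (p ++ l))) := by
  induction l generalizing p with
  | nil => simp [findDistinctLoop1]
  | cons c rest ih =>
    have hx : c.toNat < 256 := hs c (by simp)
    have hrest : ∀ d ∈ rest, d.toNat < 256 := fun d hd => hs d (by simp [hd])
    simp only [findDistinctLoop1]
    rw [PySem.List.getD_map_range _ _ _ _ hx, set_map_range]
    have hcntf : Function.update (codeCnt p) c.toNat (codeCnt p c.toNat + 1) = codeCnt (p ++ [c]) := by
      funext y
      rw [codeCnt_append_single, Function.update_apply]
      rcases eq_or_ne y c.toNat with rfl | hne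
      · simp
      · rw [if_neg hne, if_neg (by simp only [beq_iff_eq]; exact fun h => (hne h.symm).elim), add_zero]
    rw [hcntf]
    rw [PySem.List.getD_map_range _ _ _ _ hx]
    have hgot : codeCnt (p ++ [c]) c.toNat = codeCnt p c.toNat + 1 := by
      rw [codeCnt_append_single]; simp
    rw [hgot]
    have hidxf := idxF_append_single p c n
    have h0le : (0 : Int) ≤ codeCnt p c.toNat := by simp only [codeCnt]; positivity
    have hfin : ∀ idx2 : List Int, idx2 = (List.range 256).map (idxF n (p ++ [c])) →
        findDistinctLoop1 n rest (p.length + 1) ((List.range 256).map (codeCnt (p ++ [c]))) idx2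
          = ((List.range 256).map (codeCnt (p ++ c :: rest)), (List.range 256).map (idxF n (p ++ c :: rest))) := by
      intro idx2 h2
      subst h2
      have := ih (p ++ [c]) hrest
      simp only [List.length_append, List.length_cons, List.length_nil, List.append_assoc,
        List.cons_append, List.nil_append] at this ⊢
      exact this
    rcases eq_or_ne (codeCnt p c.toNat) 0 with h0 | h0
    · rw [h0]
      norm_num
      rw [set_map_range]
      apply hfin
      apply congrArg (fun f => List.map f (List.range 256))
      funext y
      simp only [hidxf, Function.update_apply]
      rcases eq_or_ne y c.toNat with rfl | hne
      · rw [if_pos rfl, if_pos rfl, if_pos h0]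
      · rw [if_neg hne, if_neg hne]
    · rcases eq_or_ne (codeCnt p c.toNat) 1 with h1 | h1
      · rw [h1]
        norm_num
        rw [set_map_range]
        apply hfin
        apply congrArg (fun f => List.map f (List.range 256))
        funext y
        simp only [hidxf, Function.update_apply]
        rcases eq_or_ne y c.toNat with rfl | hne
        · rw [if_pos rfl, if_pos rfl, if_neg h0, if_pos h1]
        · rw [if_neg hne, if_neg hne]
      · rw [if_neg (by omega), if_neg (by omega)]
        apply hfin
        apply congrArg (fun f => List.map f (List.range 256))
        funext y
        simp only [hidxf]
        rcases eq_or_ne y c.toNat with rfl | hne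
        · rw [if_pos rfl, if_neg h0, if_neg h1]
        · rw [if_neg hne]

lemma countP_le_one_unique {α : Type} (pred : α → Bool) (l : List α) (h : l.countP pred ≤ 1) :
    ∀ i j (hi : i < l.length) (hj : j < l.length), pred l[i] → pred l[j] → i = j := by
  induction l with
  | nil => intro i j hi; simp at hi
  | cons a t ih =>
    intro i j hi hj hpi hpj
    rw [List.countP_cons] at h
    by_cases hpa : pred a
    · have ht0 : t.countP pred = 0 := by rw [if_pos hpa] at h; omega
      have hnone := List.countP_eq_zero.mp ht0
      match i, j with
      | 0, 0 => rfl
      | 0, j + 1 =>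
        have hj' : j < t.length := by simpa using hj
        exact absurd hpj (by simpa using hnone (t[j]'hj') (List.getElem_mem hj'))
      | i + 1, _ =>
        have hi' : i < t.length := by simpa using hi
        exact absurd hpi (by simpa using hnone (t[i]'hi') (List.getElem_mem hi'))
    · have ht1 : t.countP pred ≤ 1 := by rw [if_neg hpa] at h; omega
      match i, j with
      | 0, _ => exact absurd hpi (by simpa using hpa)
      | i + 1, 0 => exact absurd hpj (by simpa using hpa)
      | i + 1, j + 1 =>
        have := ih ht1 i j (by simpa using hi) (by simpa using hj)
          (by simpa using hpi) (by simpa using hpj)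
        omega

-- the sorted index array, named: unique positions in increasing order, then the n's
lemma sorted_index_eq (l : List Char) (hs : ∀ c ∈ l, c.toNat < 256) :
    PySem.List.sorted ((List.range 256).map (idxF (l.length : Int) l)) (fun x => x)
      = (qual l).map (fun ci => (ci.2 : Int))
        ++ List.replicate ((List.range 256).filter (fun x => !(codeCnt l x == 1))).length (l.length : Int) := by
  set N : Int := (l.length : Int) with hN
  set P : Nat → Bool := fun x => codeCnt l x == 1 with hP
  -- basic facts about codes with count 1
  have hcnt1 : ∀ x : Nat, P x = true → l.countP (fun d => d.toNat == x) = 1 := by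
    intro x hx
    have : codeCnt l x = 1 := by simpa [hP] using hx
    simp only [codeCnt] at this
    exact_mod_cast this
  have hfind : ∀ x : Nat, P x = true →
      ∃ hlt : l.findIdx (fun d => d.toNat == x) < l.length,
        (l[l.findIdx (fun d => d.toNat == x)]'hlt).toNat = x := by
    intro x hx
    have h1 := hcnt1 x hx
    have hlt : l.findIdx (fun d => d.toNat == x) < l.length := by
      rw [List.findIdx_lt_length]
      rcases List.countP_pos_iff.mp (by rw [h1]; exact Nat.one_pos) with ⟨a, ha, hpa⟩
      exact ⟨a, ha, hpa⟩
    exact ⟨hlt, by simpa using List.findIdx_getElem (w := hlt)⟩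
  -- membership in quali
  have hquali_mem : ∀ a : Int, a ∈ (qual l).map (fun ci => (ci.2 : Int)) ↔
      ∃ i : Nat, ∃ hi : i < l.length, P ((l[i]'hi).toNat) = true ∧ a = (i : Int) := by
    intro a
    simp only [qual, List.mem_map, List.mem_filter]
    constructor
    · rintro ⟨⟨c, i⟩, ⟨hmem, hp⟩, rfl⟩
      obtain ⟨-, hlt, he⟩ := List.mem_zipIdx hmem
      simp only at he hp ⊢
      refine ⟨i, by omega, ?_, rfl⟩
      rw [show l[i]'(by omega) = c from by simp only [Nat.sub_zero] at he; exact he.symm]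
      exact hp
    · rintro ⟨i, hi, hp, rfl⟩
      refine ⟨(l[i]'hi, i), ⟨?_, hp⟩, rfl⟩
      have : l.zipIdx[i]'(by simpa using hi) = (l[i]'hi, i) := by
        rw [List.getElem_zipIdx]; simp
      rw [← this]
      exact List.getElem_mem _
  -- the A side of the permutation, with idxF evaluated on count-1 codes
  have hmapA : ((List.range 256).filter P).map (idxF N l)
      = ((List.range 256).filter P).map (fun x => ((l.findIdx (fun d => d.toNat == x)) : Int)) := by
    apply List.map_congr_left
    intro x hx
    have hp := (List.mem_filter.mp hx).2
    simp only [idxF]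
    rw [if_pos (by simpa [hP, codeCnt] using hp)]
  -- nodup of both sides
  have hnodupA : (((List.range 256).filter P).map (fun x => ((l.findIdx (fun d => d.toNat == x)) : Int))).Nodup := by
    refine List.Nodup.map_on ?_ (List.Nodup.filter _ (List.nodup_range))
    intro x hx y hy hxy
    obtain ⟨hltx, hgx⟩ := hfind x (List.mem_filter.mp hx).2
    obtain ⟨hlty, hgy⟩ := hfind y (List.mem_filter.mp hy).2
    have : l.findIdx (fun d => d.toNat == x) = l.findIdx (fun d => d.toNat == y) := by exact_mod_cast hxy
    rw [← hgx, ← hgy]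
    simp only [this]
  have hpairq : ((qual l).map (fun ci => (ci.2 : Int))).Pairwise (· < ·) := by
    have h1 : (l.zipIdx.map Prod.snd).Pairwise (· < ·) := by
      rw [List.zipIdx_map_snd, ← List.range_eq_range']
      exact List.pairwise_lt_range
    have h2 : ((qual l).map Prod.snd).Pairwise (· < ·) :=
      List.Pairwise.sublist (List.Sublist.map _ List.filter_sublist) h1
    have h3 := List.Pairwise.map (S := fun a b : Int => a < b) (f := fun k : Nat => (k : Int))
      (fun a b h => Int.ofNat_lt.mpr h) h2
    rw [List.map_map] at h3
    exact h3
  have hnodupq : ((qual l).map (fun ci => (ci.2 : Int))).Nodup :=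
    hpairq.imp (fun h => ne_of_lt h)
  -- the two nodup lists have the same members, hence are permutations
  have hpermP : (((List.range 256).filter P).map (fun x => ((l.findIdx (fun d => d.toNat == x)) : Int))).Perm
      ((qual l).map (fun ci => (ci.2 : Int))) := by
    rw [List.perm_ext_iff_of_nodup hnodupA hnodupq]
    intro a
    rw [hquali_mem]
    simp only [List.mem_map, List.mem_filter, List.mem_range]
    constructor
    · rintro ⟨x, ⟨hx256, hpx⟩, rfl⟩
      obtain ⟨hlt, hg⟩ := hfind x hpx
      exact ⟨_, hlt, by rw [hg]; exact hpx, rfl⟩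
    · rintro ⟨i, hi, hp, rfl⟩
      set x := (l[i]'hi).toNat with hxdef
      refine ⟨x, ⟨hs _ (List.getElem_mem hi), hp⟩, ?_⟩
      obtain ⟨hlt, hg⟩ := hfind x hp
      have huniq := countP_le_one_unique (fun d => d.toNat == x) l (by rw [hcnt1 x hp])
        i (l.findIdx (fun d => d.toNat == x)) hi hlt
        (by simp only [beq_iff_eq]; exact hxdef.symm) (by simpa using hg)
      exact_mod_cast congrArg (fun k : Nat => (k : Int)) huniq.symm
  -- the constant part
  have hconst : ((List.range 256).filter (fun x => !(P x))).map (idxF N l)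
      = List.replicate ((List.range 256).filter (fun x => !(P x))).length N := by
    rw [List.eq_replicate_iff]
    refine ⟨by rw [List.length_map], ?_⟩
    intro b hb
    rcases List.mem_map.mp hb with ⟨x, hx, rfl⟩
    have hpx := (List.mem_filter.mp hx).2
    simp only [idxF]
    rw [if_neg (by simpa [hP, codeCnt] using hpx)]
  -- assemble the permutation
  have hperm : ((qual l).map (fun ci => (ci.2 : Int))
      ++ List.replicate ((List.range 256).filter (fun x => !(P x))).length N).Perm
      ((List.range 256).map (idxF N l)) := by
    have hbase := (List.filter_append_perm P (List.range 256)).map (idxF N l)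
    rw [List.map_append] at hbase
    refine List.Perm.trans ?_ hbase
    apply List.Perm.append
    · rw [hmapA]; exact hpermP.symm
    · rw [hconst]
  -- the combined list is sorted
  have hqlt : ∀ a ∈ (qual l).map (fun ci => (ci.2 : Int)), a < N := by
    intro a ha
    rcases (hquali_mem a).mp ha with ⟨i, hi, -, rfl⟩
    rw [hN]
    exact_mod_cast hi
  have hpair : ((qual l).map (fun ci => (ci.2 : Int))
      ++ List.replicate ((List.range 256).filter (fun x => !(P x))).length N).Pairwise (· ≤ ·) := by
    rw [List.pairwise_append]
    refine ⟨hpairq.imp (fun h => le_of_lt h), List.pairwise_replicate.mpr (by simp), ?_⟩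
    intro a ha b hb
    rw [List.eq_of_mem_replicate hb]
    exact le_of_lt (hqlt a ha)
  exact PySem.List.sorted_id_eq_of_perm_of_pairwise _ _ hperm hpair

lemma loop2_run (l : List Char) (q : List (Char × Nat)) (m : Nat)
    (hq : ∀ ci ∈ q, ∃ h : ci.2 < l.length, l[ci.2] = ci.1) (acc : List Char) :
    findDistinctLoop2 l (l.length : Int)
        (q.map (fun ci => (ci.2 : Int)) ++ List.replicate m (l.length : Int)) acc
      = acc ++ q.map (·.1) := by
  induction q generalizing acc with
  | nil =>
    cases m with
    | zero => simp [findDistinctLoop2]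
    | succ k => simp [List.replicate_succ, findDistinctLoop2]
  | cons ci rest ih =>
    obtain ⟨hlt, hget⟩ := hq ci (by simp)
    simp only [List.map_cons, List.cons_append, findDistinctLoop2]
    rw [if_neg (by exact_mod_cast Nat.ne_of_lt hlt)]
    rw [PySem.List.pyGet?_natCast, List.getElem?_eq_getElem hlt, hget]
    simp only [Option.getD_some]
    rw [ih (fun d hd => hq d (List.mem_cons_of_mem _ hd)) (acc ++ [ci.1])]
    simp

lemma qual_map_fst (l : List Char) :
    (qual l).map (·.1) = l.filter (fun c => codeCnt l c.toNat == 1) := by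
  have h := List.filter_map (f := Prod.fst) (p := fun c => codeCnt l c.toNat == 1) (l := l.zipIdx)
  rw [List.zipIdx_map_fst] at h
  rw [h]
  rfl

-- ===== VERDICT (by name: the statement is the Claim_ definition above) =====
theorem findDistinct_spec : Claim_equal_findDistinct := by
  intro Str hdom
  unfold Spec_findDistinct findDistinct findDistinct_alt
  have hs : ∀ c ∈ Str.toList, c.toNat < 256 := by
    intro c hc
    have := List.all_eq_true.mp hdom c hc
    simp [pvDomChar] at this
    omega
  set l := Str.toList with hl
  have h0 : (List.replicate 256 (0 : Int)) = (List.range 256).map (codeCnt ([] : List Char)) := by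
    rw [show codeCnt ([] : List Char) = fun _ => (0 : Int) from rfl]
    rw [List.map_const', List.length_range]
  have hn : (List.replicate 256 ((l.length : Nat) : Int)) = (List.range 256).map (idxF (l.length : Int) ([] : List Char)) := by
    rw [show idxF (l.length : Int) ([] : List Char) = fun _ => ((l.length : Nat) : Int) from by
      funext x; simp [idxF, codeCnt]]
    rw [List.map_const', List.length_range]
  have hloop1 := loop1Inv (l.length : Int) l [] hs
  simp only [List.nil_append, List.length_nil] at hloop1
  rw [h0, hn, hloop1]
  rw [show ((List.range 256).map (codeCnt l), (List.range 256).map (idxF (l.length : Int) l)).2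
        = (List.range 256).map (idxF (l.length : Int) l) from rfl]
  rw [sorted_index_eq l hs]
  rw [loop2_run l (qual l) _ ?hq []]
  case hq =>
    intro ci hci
    have hmem : ci ∈ l.zipIdx := List.mem_of_mem_filter hci
    obtain ⟨c, i⟩ := ci
    have := List.mem_zipIdx hmem
    simp only at this ⊢
    obtain ⟨-, hlt, he⟩ := this
    exact ⟨by omega, by simp [he]⟩
  rw [List.nil_append, qual_map_fst]
  -- B's side
  rw [countFold l hs (codeCnt [])]
  congr 1
  apply List.filter_congr
  intro c hc
  rw [PySem.List.getD_map_range _ _ _ _ (hs c hc)]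
  simp [codeCnt]
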